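-- pv_equiv track=rewrite | github.com/toki866/ApexTraderAI | tools/check_leak_causality.py | _detect_ret_col
-- ===== SOURCE A (Python) =====
-- from typing import List, Optional, Dict, Tuple
--
-- def _detect_ret_col(cols: List[str]) -> Optional[str]:
--     for c in cols:
--         if c.lower() in ("portfolio_ret", "daily_ret", "ret", "reward"):
--             return c
--     for c in cols:
--         cl = c.lower()
--         if any(k in cl for k in ("portfolio_ret", "daily_ret", "ret", "reward", "pnl")):
--             return c
--     return None
-- ===== SOURCE B (Python) =====
-- from typing import List, Optional
--
-- def _detect_ret_col(cols: List[str]) -> Optional[str]: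
--     fallback = None
--     for c in cols:
--         cl = c.lower()
--         if cl in ("portfolio_ret", "daily_ret", "ret", "reward"):
--             return c
--         if fallback is None and any(k in cl for k in ("portfolio_ret", "daily_ret", "ret", "reward", "pnl")):
--             fallback = c
--     return fallback
-- ===== Notes on version B (the rewrite author's own statement) =====
-- stated objective: simpler
-- what changed: Replaces A's two sequential scans (exact-match pass, then substring pass) by a single pass that returns immediately on an exact match and records the first substring match as a fallback; correct because every exact keyword is also a substring keyword, so exact matches always dominate earlier fallbacks.
import Mathlib
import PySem

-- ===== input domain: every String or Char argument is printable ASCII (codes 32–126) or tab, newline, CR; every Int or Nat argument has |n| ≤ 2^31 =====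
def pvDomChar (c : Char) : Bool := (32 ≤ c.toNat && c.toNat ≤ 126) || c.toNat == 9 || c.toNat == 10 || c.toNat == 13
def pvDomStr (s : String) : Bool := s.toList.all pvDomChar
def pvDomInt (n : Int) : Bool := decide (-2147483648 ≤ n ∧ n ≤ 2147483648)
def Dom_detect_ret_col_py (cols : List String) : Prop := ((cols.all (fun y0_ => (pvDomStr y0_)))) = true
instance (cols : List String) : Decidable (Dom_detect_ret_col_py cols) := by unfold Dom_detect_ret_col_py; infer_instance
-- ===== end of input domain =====

-- B replaces A's two sequential scans by one pass with a fallback accumulator (objective: simpler).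

-- ===== PORT A =====
-- c.lower() in ("portfolio_ret", "daily_ret", "ret", "reward")
def pvExact (c : String) : Bool :=
  ["portfolio_ret", "daily_ret", "ret", "reward"].contains (PySem.Str.lower c)

-- any(k in cl for k in ("portfolio_ret", "daily_ret", "ret", "reward", "pnl"))
def pvSub (c : String) : Bool :=
  ["portfolio_ret", "daily_ret", "ret", "reward", "pnl"].any
    (fun k => PySem.Str.isIn k (PySem.Str.lower c))

-- first loop of A
def pvLoop1 : List String → Option String
  | [] => none
  | c :: rest => if pvExact c then some c else pvLoop1 rest

-- second loop of A
def pvLoop2 : List String → Option String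
  | [] => none
  | c :: rest => if pvSub c then some c else pvLoop2 rest

def detect_ret_col_py (cols : List String) : Option String :=
  match pvLoop1 cols with
  | some c => some c
  | none => pvLoop2 cols

-- ===== PORT B =====
-- single loop of B carrying the fallback variable
def pvLoopB : List String → Option String → Option String
  | [], fallback => fallback
  | c :: rest, fallback =>
    let cl := PySem.Str.lower c
    if ["portfolio_ret", "daily_ret", "ret", "reward"].contains cl then some c
    else
      pvLoopB rest
        (if fallback.isNone &&
            ["portfolio_ret", "daily_ret", "ret", "reward", "pnl"].any
              (fun k => PySem.Str.isIn k cl)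
         then some c else fallback)

def detect_ret_col_py_alt (cols : List String) : Option String :=
  pvLoopB cols none

-- ===== PRECONDITION & SPEC =====
def Spec_detect_ret_col_py (cols : List String) (out : Option String) : Prop := out = detect_ret_col_py_alt cols
instance (cols : List String) (out : Option String) : Decidable (Spec_detect_ret_col_py cols out) := by unfold Spec_detect_ret_col_py; infer_instance

-- ===== CLAIM (what is proved, stated in full; the proofs are below) =====
def Claim_equal_detect_ret_col_py : Prop := ∀ (cols : List String), Dom_detect_ret_col_py cols → Spec_detect_ret_col_py cols (detect_ret_col_py cols)

-- ===== LEMMAS AND PROOFS =====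
-- loop invariant of B: the fallback is consulted after the exact matches of the rest,
-- but before the substring matches of the rest
theorem pvLoopB_eq (cols : List String) (fb : Option String) :
    pvLoopB cols fb =
      match pvLoop1 cols with
      | some c => some c
      | none => match fb with
                | some f => some f
                | none => pvLoop2 cols := by
  induction cols generalizing fb with
  | nil => cases fb <;> simp [pvLoopB, pvLoop1, pvLoop2]
  | cons c rest ih =>
    have hE : (["portfolio_ret", "daily_ret", "ret", "reward"].contains
        (PySem.Str.lower c)) = pvExact c := rfl
    have hS : (["portfolio_ret", "daily_ret", "ret", "reward", "pnl"].any
        (fun k => PySem.Str.isIn k (PySem.Str.lower c))) = pvSub c := rfl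
    simp only [pvLoopB, pvLoop1, pvLoop2, hE, hS]
    cases hx : pvExact c
    · simp only [Bool.false_eq_true, if_false, ih]
      cases fb with
      | some f => simp
      | none =>
        cases hs : pvSub c <;> simp [hs]
    · simp

-- ===== VERDICT (by name: the statement is the Claim_ definition above) =====
theorem detect_ret_col_py_spec : Claim_equal_detect_ret_col_py := by
  intro cols _
  unfold Spec_detect_ret_col_py detect_ret_col_py detect_ret_col_py_alt
  rw [pvLoopB_eq]
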